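-- pv_equiv track=rewrite | github.com/RI-SE/BIDAF | bidaf/hgm.py | deeprandompick
-- ===== SOURCE A (Python) =====
-- def deepsum(cube):
--     if type(cube[0]) == list:
--         return sum([deepsum(lst) for lst in cube])
--     else:
--         return sum(cube)
--
-- def deeprandompick(cube, thres):
--     if type(cube[0]) == list:
--         for i in range(len(cube)):
--             s = deepsum(cube[i])
--             if s>thres:
--                 return [i] + deeprandompick(cube[i], thres)
--             else:
--                 thres -= s
--     else:
--         for i in range(len(cube)):
--             if cube[i]>thres:
--                 return [i]
--             else:
--                 thres -= cube[i]
-- ===== SOURCE B (Python) =====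
-- def deeprandompick(cube, thres):
--     # Two-pass: build the list of prefix sums, then return the first index
--     # whose prefix sum exceeds thres (None if no crossing).
--     total = 0
--     sums = []
--     for x in cube:
--         total += x
--         sums.append(total)
--     for i in range(len(sums)):
--         if sums[i] > thres:
--             return [i]
--     return None
-- ===== Notes on version B (the rewrite author's own statement) =====
-- stated objective: alternative
-- what changed: B precomputes the list of prefix sums in one pass and then searches it for the first entry exceeding thres, instead of A's single loop that destructively decrements thres by each element; the flat List Int signature makes A's nested-list branch unreachable, and Pre_ excludes only the empty list, on which A raises IndexError.
import Mathlib
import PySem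

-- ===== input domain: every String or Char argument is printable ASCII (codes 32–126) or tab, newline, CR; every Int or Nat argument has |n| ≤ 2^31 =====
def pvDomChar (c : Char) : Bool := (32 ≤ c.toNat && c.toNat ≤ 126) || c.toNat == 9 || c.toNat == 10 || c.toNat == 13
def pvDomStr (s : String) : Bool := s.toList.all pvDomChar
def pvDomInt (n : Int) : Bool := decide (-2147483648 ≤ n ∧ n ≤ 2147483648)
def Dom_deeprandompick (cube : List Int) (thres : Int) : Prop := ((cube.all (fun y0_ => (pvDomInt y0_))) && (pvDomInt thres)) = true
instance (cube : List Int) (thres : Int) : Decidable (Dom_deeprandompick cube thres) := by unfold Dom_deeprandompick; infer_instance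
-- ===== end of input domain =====

-- ===== PORT A =====
-- A's outer `type(cube[0]) == list` test is statically False for a List Int
-- argument (and raises IndexError on []: excluded by Pre_); what remains is the
-- integer loop, transliterated with the mutable `thres` as the accumulator.
def pvA_loop : List Int → Int → Int → Option (List Int)
  | [], _, _ => none
  | x :: xs, thres, i => if x > thres then some [i] else pvA_loop xs (thres - x) (i + 1)

def deeprandompick (cube : List Int) (thres : Int) : Option (List Int) :=
  pvA_loop cube thres 0

-- ===== PORT B =====
-- B: build the prefix-sum list in one pass, then scan it for the first entry > thres.
def pvB_prefix : List Int → Int → List Int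
  | [], _ => []
  | x :: xs, total => (total + x) :: pvB_prefix xs (total + x)

def pvB_find : List Int → Int → Int → Option (List Int)
  | [], _, _ => none
  | s :: ss, thres, i => if s > thres then some [i] else pvB_find ss thres (i + 1)

def deeprandompick_alt (cube : List Int) (thres : Int) : Option (List Int) :=
  pvB_find (pvB_prefix cube 0) thres 0

-- ===== PRECONDITION & SPEC =====
-- Pre_ excludes only the empty list, on which A raises IndexError at cube[0].
def Pre_deeprandompick (cube : List Int) (thres : Int) : Prop := cube ≠ []
instance (cube : List Int) (thres : Int) : Decidable (Pre_deeprandompick cube thres) := by unfold Pre_deeprandompick; infer_instance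
def pvWitness_deeprandompick : List Int × Int := ([2, 3, 4], 4)

def Spec_deeprandompick (cube : List Int) (thres : Int) (out : Option (List Int)) : Prop := out = deeprandompick_alt cube thres
instance (cube : List Int) (thres : Int) (out : Option (List Int)) : Decidable (Spec_deeprandompick cube thres out) := by unfold Spec_deeprandompick; infer_instance

-- ===== CLAIM (what is proved, stated in full; the proofs are below) =====
def Claim_equal_deeprandompick : Prop := ∀ (cube : List Int) (thres : Int), Dom_deeprandompick cube thres → Pre_deeprandompick cube thres → Spec_deeprandompick cube thres (deeprandompick cube thres)

-- ===== LEMMAS AND PROOFS =====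
-- Loop invariant: A's residual threshold `thres - acc` matches B's comparison of
-- prefix sums (starting from accumulated sum `acc`) against the original thres.
theorem pvAB_loop_eq (xs : List Int) : ∀ (thres acc i : Int),
    pvA_loop xs (thres - acc) i = pvB_find (pvB_prefix xs acc) thres i := by
  induction xs with
  | nil => intro thres acc i; rfl
  | cons x xs ih =>
    intro thres acc i
    simp only [pvA_loop, pvB_prefix, pvB_find]
    by_cases h : x > thres - acc
    · rw [if_pos h, if_pos (by omega)]
    · rw [if_neg h, if_neg (by omega)]
      have : thres - acc - x = thres - (acc + x) := by ring
      rw [this, ih]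

-- ===== VERDICT (by name: the statement is the Claim_ definition above) =====
theorem deeprandompick_spec : Claim_equal_deeprandompick := by
  intro cube thres _ _
  unfold Spec_deeprandompick deeprandompick deeprandompick_alt
  have := pvAB_loop_eq cube thres 0 0
  simpa using this
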